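-- pv_equiv track=rewrite | github.com/JzZyh/ORVIBO_Device_Control | custom_components/ORVIBO_Device_Control/hass.py | deduplicate_by_key
-- ===== SOURCE A (Python) =====
-- def deduplicate_by_key(data: list[dict], key: str):
--     result_dict = {}
--     for item in data:
--         device_id = item.get(key)
--         if device_id is not None:
--             # 如果设备已经存在，优先保留delFlag=0的设备
--             if device_id in result_dict:
--                 existing_item = result_dict[device_id]
--                 # 如果现有设备是delFlag=1而新设备是delFlag=0，则替换
--                 if existing_item.get('delFlag') == 1 and item.get('delFlag') != 1:
--                     result_dict[device_id] = item
--             else: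
--                 result_dict[device_id] = item
--     return list(result_dict.values())
-- ===== SOURCE B (Python) =====
-- def deduplicate_by_key(data: list[dict], key: str):
--     groups = {}
--     for item in data:
--         k = item.get(key)
--         if k is not None:
--             groups.setdefault(k, []).append(item)
--     return [next((x for x in g if x.get('delFlag') != 1), g[0])
--             for g in groups.values()]
-- ===== Notes on version B (the rewrite author's own statement) =====
-- stated objective: alternative
-- what changed: B replaces A's single-pass dict with conditional in-place replacement by a two-phase decomposition: group all items by key value, then pick from each group the first item with delFlag != 1 (else the group's first item).
import Mathlib
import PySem

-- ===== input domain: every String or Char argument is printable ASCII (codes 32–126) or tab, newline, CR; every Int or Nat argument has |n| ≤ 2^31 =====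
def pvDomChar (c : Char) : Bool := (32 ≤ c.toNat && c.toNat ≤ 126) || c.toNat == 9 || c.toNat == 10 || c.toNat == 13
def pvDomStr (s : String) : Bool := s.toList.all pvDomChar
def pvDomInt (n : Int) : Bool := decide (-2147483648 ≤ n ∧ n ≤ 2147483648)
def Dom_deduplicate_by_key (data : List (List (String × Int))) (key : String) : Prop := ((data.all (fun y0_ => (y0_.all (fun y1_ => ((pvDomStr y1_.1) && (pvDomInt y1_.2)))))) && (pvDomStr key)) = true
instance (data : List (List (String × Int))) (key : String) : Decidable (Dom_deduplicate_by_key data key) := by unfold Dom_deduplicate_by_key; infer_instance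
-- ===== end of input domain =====

-- B groups items by key value and then picks from each group the first item with delFlag != 1
-- (else the group's first item) — an alternative two-phase decomposition of A's one-pass
-- conditional-replacement loop; same cost, equal return value on every input.

-- ===== PORT A =====
-- item.get(k) on an association-list dict: first matching pair (shared dict-get helper)
def pvAGet (d : List (String × Int)) (k : String) : Option Int :=
  (d.find? (fun p => p.1 == k)).map (fun p => p.2)

def dedupStepA (key : String) (rd : PySem.Dict Int (List (String × Int)))
    (item : List (String × Int)) : PySem.Dict Int (List (String × Int)) :=
  match pvAGet item key with
  | none => rd
  | some id =>
    if rd.contains id then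
      if pvAGet (rd.getD id []) "delFlag" = some 1 ∧ pvAGet item "delFlag" ≠ some 1 then
        rd.insert id item
      else rd
    else rd.insert id item

def deduplicate_by_key (data : List (List (String × Int))) (key : String) :
    List (List (String × Int)) :=
  (data.foldl (dedupStepA key) PySem.Dict.empty).values

-- ===== PORT B =====
def dedupStepB (key : String) (g : PySem.Dict Int (List (List (String × Int))))
    (item : List (String × Int)) : PySem.Dict Int (List (List (String × Int))) :=
  match pvAGet item key with
  | none => g
  | some k => g.modify k [] (fun xs => xs ++ [item])   -- groups.setdefault(k, []).append(item)

-- next((x for x in g if x.get('delFlag') != 1), g[0]); groups are nonempty by construction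
def chooseB (g : List (List (String × Int))) : List (String × Int) :=
  (g.find? (fun x => !(pvAGet x "delFlag" == some 1))).getD (g.headD [])

def deduplicate_by_key_alt (data : List (List (String × Int))) (key : String) :
    List (List (String × Int)) :=
  ((data.foldl (dedupStepB key) PySem.Dict.empty).values).map chooseB

-- ===== PRECONDITION & SPEC =====
def Spec_deduplicate_by_key (data : List (List (String × Int))) (key : String) (out : List (List (String × Int))) : Prop := out = deduplicate_by_key_alt data key
instance (data : List (List (String × Int))) (key : String) (out : List (List (String × Int))) : Decidable (Spec_deduplicate_by_key data key out) := by unfold Spec_deduplicate_by_key; infer_instance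

-- ===== CLAIM (what is proved, stated in full; the proofs are below) =====
def Claim_equal_deduplicate_by_key : Prop := ∀ (data : List (List (String × Int))) (key : String), Dom_deduplicate_by_key data key → Spec_deduplicate_by_key data key (deduplicate_by_key data key)

-- ===== LEMMAS AND PROOFS =====

-- find? by key commutes with a value-only map over an association list
theorem find?_fst_map {nu mu : Type} (l : List (Int × nu)) (f : Int × nu → mu) (id : Int) :
    (l.map (fun p => (p.1, f p))).find? (fun p => p.1 == id) =
    (l.find? (fun p => p.1 == id)).map (fun p => (p.1, f p)) := by
  rw [List.find?_map]; rfl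

-- loop invariant relating A's result dict to B's groups dict after the same prefix of data
def DedupInv (rd : PySem.Dict Int (List (String × Int)))
    (g : PySem.Dict Int (List (List (String × Int)))) : Prop :=
  rd.items = g.items.map (fun p => (p.1, chooseB p.2)) ∧
  (g.items.map Prod.fst).Nodup ∧
  ∀ p ∈ g.items, p.2 ≠ []

theorem chooseB_append (grp : List (List (String × Int))) (item : List (String × Int))
    (h : grp ≠ []) :
    chooseB (grp ++ [item]) =
      if pvAGet (chooseB grp) "delFlag" = some 1 ∧ pvAGet item "delFlag" ≠ some 1 then item
      else chooseB grp := by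
  unfold chooseB
  rw [List.find?_append]
  cases hf : grp.find? (fun x => !(pvAGet x "delFlag" == some 1)) with
  | some x =>
    have hx : pvAGet x "delFlag" ≠ some 1 := by
      have := List.find?_some hf
      simpa using this
    simp [hx]
  | none =>
    obtain ⟨h0, t, rfl⟩ : ∃ h0 t, grp = h0 :: t := by
      cases grp with
      | nil => exact absurd rfl h
      | cons a t => exact ⟨a, t, rfl⟩
    have hh0 : pvAGet h0 "delFlag" = some 1 := by
      have := List.find?_eq_none.mp hf h0 (by simp)
      simpa using this
    by_cases hi : pvAGet item "delFlag" = some 1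
    · simp [hi, hh0]
    · simp [hi, hh0]

theorem dedup_step (key : String) (item : List (String × Int))
    (rd : PySem.Dict Int (List (String × Int)))
    (g : PySem.Dict Int (List (List (String × Int)))) (h : DedupInv rd g) :
    DedupInv (dedupStepA key rd item) (dedupStepB key g item) := by
  obtain ⟨hitems, hnodup, hne⟩ := h
  unfold dedupStepA dedupStepB
  cases hid : pvAGet item key with
  | none => exact ⟨hitems, hnodup, hne⟩
  | some id =>
    dsimp only
    have hfst : ∀ p : Int × List (List (String × Int)),
        ((p.1, chooseB p.2) : Int × List (String × Int)).1 = p.1 := fun _ => rfl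
    have hcont : rd.contains id = g.contains id := by
      rw [PySem.Dict.contains, PySem.Dict.contains, hitems, List.any_map]; rfl
    have hget : rd.get? id = (g.get? id).map (fun grp => chooseB grp) := by
      rw [PySem.Dict.get?, PySem.Dict.get?, hitems,
        find?_fst_map g.items (fun p => chooseB p.2) id]
      cases g.items.find? (fun p => p.1 == id) <;> rfl
    by_cases hc : g.contains id = true
    · -- key already present in both dicts
      obtain ⟨p0, hp0⟩ : ∃ p0, g.items.find? (fun p => p.1 == id) = some p0 := by
        have : (g.items.find? (fun p => p.1 == id)).isSome := by
          rw [List.find?_isSome]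
          simpa [PySem.Dict.contains, List.any_eq_true] using hc
        exact Option.isSome_iff_exists.mp this
      have hp0mem : p0 ∈ g.items := List.mem_of_find?_eq_some hp0
      have hp0id : p0.1 = id := by simpa using List.find?_some hp0
      have hp0ne : p0.2 ≠ [] := hne p0 hp0mem
      have hgetg : g.get? id = some p0.2 := by simp [PySem.Dict.get?, hp0]
      have hgetrd : rd.getD id [] = chooseB p0.2 := by
        simp [PySem.Dict.getD, hget, hgetg]
      have hmod : g.modify id [] (fun xs => xs ++ [item]) = g.insert id (p0.2 ++ [item]) := by
        simp [PySem.Dict.modify, PySem.Dict.getD, hgetg]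
      have hitemsg : (g.insert id (p0.2 ++ [item])).items =
          g.items.map (fun p => if p.1 == id then (id, p0.2 ++ [item]) else p) := by
        simp [PySem.Dict.insert, hc]
      have hkeysg : ((g.insert id (p0.2 ++ [item])).items.map Prod.fst) = g.items.map Prod.fst := by
        rw [hitemsg, List.map_map]
        apply List.map_congr_left
        intro p _
        by_cases hpe : p.1 = id <;> simp [hpe]
      have hCB : chooseB (p0.2 ++ [item]) =
          if pvAGet (chooseB p0.2) "delFlag" = some 1 ∧ pvAGet item "delFlag" ≠ some 1 then item
          else chooseB p0.2 := chooseB_append p0.2 item hp0ne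
      have huniq : ∀ p ∈ g.items, p.1 = id → p = p0 := by
        intro p hp hpid
        exact (List.nodup_map_iff_inj_on (List.Nodup.of_map Prod.fst hnodup)).mp hnodup
          p hp p0 hp0mem (by rw [hpid, hp0id])
      rw [hcont, hgetrd, hmod]
      refine ⟨?_, by rw [hkeysg]; exact hnodup, ?_⟩
      · by_cases hcond : pvAGet (chooseB p0.2) "delFlag" = some 1 ∧ pvAGet item "delFlag" ≠ some 1
        · simp only [if_pos hc, if_pos hcond]
          rw [PySem.Dict.insert, if_pos (by rw [hcont]; exact hc), hitems, hitemsg,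
            List.map_map, List.map_map]
          apply List.map_congr_left
          intro p _
          by_cases hpe : p.1 = id
          · simp [hpe, hCB, hcond]
          · simp [hpe]
        · simp only [if_pos hc, if_neg hcond]
          rw [hitems, hitemsg, List.map_map]
          apply List.map_congr_left
          intro p hp
          by_cases hpe : p.1 = id
          · have hpp0 : p = p0 := huniq p hp hpe
            rw [hpp0]
            simp [hp0id, hCB, hcond]
          · simp [hpe]
      · intro p hp
        rw [hitemsg] at hp
        obtain ⟨q, hq, hqe⟩ := List.mem_map.mp hp
        subst hqe
        by_cases hpe : q.1 = id
        · simp [hpe]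
        · simpa [hpe] using hne q hq
    · -- new key: both dicts append
      have hcontf : rd.contains id = false := by rw [hcont]; simpa using hc
      have hgetg : g.get? id = none := by
        rw [PySem.Dict.get?_eq_none_iff_contains]
        simpa using hc
      have hcf : g.contains id = false := by simpa using hc
      have hmod : (g.modify id [] (fun xs => xs ++ [item])).items = g.items ++ [(id, [item])] := by
        simp [PySem.Dict.modify, PySem.Dict.getD, hgetg, PySem.Dict.insert, hcf]
      have hins : (rd.insert id item).items = rd.items ++ [(id, item)] := by
        simp [PySem.Dict.insert, hcontf]
      have hCB1 : chooseB [item] = item := by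
        unfold chooseB
        cases hq : (pvAGet item "delFlag" == some 1) <;> simp [hq]
      rw [hcont, if_neg (by simpa using hc)]
      refine ⟨?_, ?_, ?_⟩
      · rw [hins, hmod, hitems, List.map_append]
        simp [hCB1]
      · rw [hmod, List.map_append]
        have hnotin : id ∉ g.items.map Prod.fst := by
          intro hmem
          obtain ⟨q, hq, hqe⟩ := List.mem_map.mp hmem
          exact hc (by
            simp only [PySem.Dict.contains, List.any_eq_true]
            exact ⟨q, hq, by simp [hqe]⟩)
        simp only [List.nodup_append, List.map_cons, List.map_nil]
        refine ⟨hnodup, by simp, ?_⟩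
        intro a ha b hb heq
        rw [List.mem_singleton] at hb
        exact hnotin ((heq.trans hb) ▸ ha)
      · intro p hp
        rw [hmod] at hp
        rcases List.mem_append.mp hp with hp1 | hp1
        · exact hne p hp1
        · simp at hp1; subst hp1; simp

theorem dedup_fold (key : String) (data : List (List (String × Int)))
    (rd : PySem.Dict Int (List (String × Int)))
    (g : PySem.Dict Int (List (List (String × Int)))) (h : DedupInv rd g) :
    DedupInv (data.foldl (dedupStepA key) rd) (data.foldl (dedupStepB key) g) := by
  induction data generalizing rd g with
  | nil => exact h
  | cons x xs ih => exact ih _ _ (dedup_step key x rd g h)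

-- ===== VERDICT (by name: the statement is the Claim_ definition above) =====
theorem deduplicate_by_key_spec : Claim_equal_deduplicate_by_key := by
  intro data key _
  unfold Spec_deduplicate_by_key deduplicate_by_key deduplicate_by_key_alt
  have h := dedup_fold key data PySem.Dict.empty PySem.Dict.empty
    ⟨by simp [PySem.Dict.empty], by simp [PySem.Dict.empty], by simp [PySem.Dict.empty]⟩
  simp [PySem.Dict.values, h.1, Function.comp]
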